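-- pv_equiv track=rewrite | github.com/Louis-Alamo/compilador | src/util/NotacionPolaca.py | tokenizar
-- ===== SOURCE A (Python) =====
-- def tokenizar(expresion):
--     """
--     Convierte la expresión en tokens, agrupando números de múltiples dígitos
--     y variables de múltiples caracteres.
--     """
--     tokens = []
--     i = 0
--
--     while i < len(expresion):
--         char = expresion[i]
--
--         # Ignorar espacios
--         if char.isspace():
--             i += 1
--             continue
--
--         # Agrupar dígitos consecutivos (números de múltiples dígitos)
--         if char.isdigit():
--             numero = ''
--             while i < len(expresion) and expresion[i].isdigit():
--                 numero += expresion[i]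
--                 i += 1
--             tokens.append(numero)
--         # Agrupar letras consecutivas (variables de múltiples caracteres)
--         elif char.isalpha():
--             variable = ''
--             while i < len(expresion) and expresion[i].isalnum():
--                 variable += expresion[i]
--                 i += 1
--             tokens.append(variable)
--         # Operadores y paréntesis
--         else:
--             tokens.append(char)
--             i += 1
--
--     return tokens
-- ===== SOURCE B (Python) =====
-- def tokenizar(expresion):
--     """Single forward pass with a small mode state machine: instead of an index
--     and nested scanning loops, fold over the characters, either extending the
--     last token or starting a new one."""
--     tokens = []
--     mode = 0  # 0: nothing extendable, 1: inside a number, 2: inside a variable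
--     for ch in expresion:
--         if ch.isspace():
--             mode = 0
--         elif ch.isdigit() and mode == 1:
--             tokens[-1] += ch
--         elif ch.isalnum() and mode == 2:
--             tokens[-1] += ch
--         elif ch.isdigit():
--             tokens.append(ch)
--             mode = 1
--         elif ch.isalpha():
--             tokens.append(ch)
--             mode = 2
--         else:
--             tokens.append(ch)
--             mode = 0
--     return tokens
-- ===== Notes on version B (the rewrite author's own statement) =====
-- stated objective: alternative
-- what changed: Replaced the index-driven while loop with nested digit/alnum scanning loops by a single forward fold over the characters with a 3-state mode machine that either extends the last token or starts a new one.
import Mathlib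
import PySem

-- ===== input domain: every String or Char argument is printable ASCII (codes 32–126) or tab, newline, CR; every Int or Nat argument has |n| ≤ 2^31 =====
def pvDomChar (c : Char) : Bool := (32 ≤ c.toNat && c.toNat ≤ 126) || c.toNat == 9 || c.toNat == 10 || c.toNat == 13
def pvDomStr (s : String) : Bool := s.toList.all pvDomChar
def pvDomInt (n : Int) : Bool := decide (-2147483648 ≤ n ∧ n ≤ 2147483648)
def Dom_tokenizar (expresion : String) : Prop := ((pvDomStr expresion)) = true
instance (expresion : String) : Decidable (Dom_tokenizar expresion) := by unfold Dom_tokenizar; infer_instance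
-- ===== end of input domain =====

-- B replaces A's index-and-inner-loops scanner by a single fold with a mode state machine (alternative decomposition, same cost).
-- Tokens are accumulated as Lists of Chars and converted with String.ofList at the end (exact: Python str concatenation = list append).

-- ===== PORT A =====
-- inner 'while' loops of A: consume chars while p holds, accumulating them (numero/variable += expresion[i]; i += 1)
def pvGrabRun (p : Char → Bool) : List Char → List Char → List Char × List Char
  | [], acc => (acc, [])
  | c :: rest, acc => if p c then pvGrabRun p rest (acc ++ [c]) else (acc, c :: rest)

-- needed by pvTokA's termination: the inner loop never leaves more input than it was given
theorem pvGrabRun_snd_len (p : Char → Bool) : ∀ (l acc : List Char), (pvGrabRun p l acc).2.length ≤ l.length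
  | [], _ => by simp [pvGrabRun]
  | c :: rest, acc => by
    by_cases h : p c = true
    · simpa [pvGrabRun, h] using Nat.le_succ_of_le (pvGrabRun_snd_len p rest (acc ++ [c]))
    · simp [pvGrabRun, h]

-- the outer 'while i < len(expresion)' of A, over the remaining characters
def pvTokA : List Char → List (List Char)
  | [] => []
  | c :: rest =>
    if PySem.Chars.isspace c then pvTokA rest
    else if hd : PySem.Chars.isdigit c then
      (pvGrabRun PySem.Chars.isdigit (c :: rest) []).1 ::
        pvTokA (pvGrabRun PySem.Chars.isdigit (c :: rest) []).2
    else if ha : PySem.Chars.isalpha c then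
      (pvGrabRun PySem.Chars.isalnum (c :: rest) []).1 ::
        pvTokA (pvGrabRun PySem.Chars.isalnum (c :: rest) []).2
    else [c] :: pvTokA rest
  termination_by l => l.length
  decreasing_by
  · simp
  · calc (pvGrabRun PySem.Chars.isdigit (c :: rest) []).2.length
        = (pvGrabRun PySem.Chars.isdigit rest [c]).2.length := by simp [pvGrabRun, hd]
      _ ≤ rest.length := pvGrabRun_snd_len _ _ _
      _ < (c :: rest).length := by simp
  · have ha' : PySem.Chars.isalnum c = true := by simp [PySem.Chars.isalnum, ha]
    calc (pvGrabRun PySem.Chars.isalnum (c :: rest) []).2.length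
        = (pvGrabRun PySem.Chars.isalnum rest [c]).2.length := by simp [pvGrabRun, ha']
      _ ≤ rest.length := pvGrabRun_snd_len _ _ _
      _ < (c :: rest).length := by simp
  · simp

def tokenizar (expresion : String) : List String :=
  (pvTokA expresion.toList).map String.ofList

-- ===== PORT B =====
-- one step of B's for-loop: state = (tokens, mode)
def pvStepB (st : List (List Char) × Nat) (ch : Char) : List (List Char) × Nat :=
  if PySem.Chars.isspace ch then (st.1, 0)
  else if PySem.Chars.isdigit ch && st.2 == 1 then
    (st.1.dropLast ++ [st.1.getLastD [] ++ [ch]], st.2)      -- tokens[-1] += ch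
  else if PySem.Chars.isalnum ch && st.2 == 2 then
    (st.1.dropLast ++ [st.1.getLastD [] ++ [ch]], st.2)      -- tokens[-1] += ch
  else if PySem.Chars.isdigit ch then (st.1 ++ [[ch]], 1)
  else if PySem.Chars.isalpha ch then (st.1 ++ [[ch]], 2)
  else (st.1 ++ [[ch]], 0)

def tokenizar_alt (expresion : String) : List String :=
  ((expresion.toList.foldl pvStepB ([], 0)).1).map String.ofList

-- ===== PRECONDITION & SPEC =====
def Spec_tokenizar (expresion : String) (out : List String) : Prop := out = tokenizar_alt expresion
instance (expresion : String) (out : List String) : Decidable (Spec_tokenizar expresion out) := by unfold Spec_tokenizar; infer_instance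

-- ===== CLAIM (what is proved, stated in full; the proofs are below) =====
def Claim_equal_tokenizar : Prop := ∀ (expresion : String), Dom_tokenizar expresion → Spec_tokenizar expresion (tokenizar expresion)

-- ===== LEMMAS AND PROOFS =====

-- character-class facts (PySem's classes are arithmetic ranges on code points)
theorem pv_digit_not_space {c : Char} (h : PySem.Chars.isdigit c = true) : PySem.Chars.isspace c = false := by
  simp [PySem.Chars.isdigit, Char.le_def, UInt32.le_iff_toNat_le] at h
  simp [PySem.Chars.isspace]
  omega

theorem pv_alnum_not_space {c : Char} (h : PySem.Chars.isalnum c = true) : PySem.Chars.isspace c = false := by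
  simp [PySem.Chars.isalnum, PySem.Chars.isalpha, PySem.Chars.isupper, PySem.Chars.islower,
        PySem.Chars.isdigit, Char.le_def, UInt32.le_iff_toNat_le] at h
  simp [PySem.Chars.isspace]
  omega

-- A's inner loop computes takeWhile/dropWhile
theorem pvGrabRun_eq (p : Char → Bool) :
    ∀ (l acc : List Char), pvGrabRun p l acc = (acc ++ l.takeWhile p, l.dropWhile p)
  | [], acc => by simp [pvGrabRun]
  | c :: rest, acc => by
    by_cases h : p c = true
    · simp [pvGrabRun, h, pvGrabRun_eq p rest (acc ++ [c])]
    · simp [pvGrabRun, h]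

-- B's step ignores a stale mode when the char cannot extend it
theorem pvStepB_one_zero {ts : List (List Char)} {c : Char} (h : PySem.Chars.isdigit c = false) :
    pvStepB (ts, 1) c = pvStepB (ts, 0) c := by
  simp [pvStepB, h]

theorem pvStepB_two_zero {ts : List (List Char)} {c : Char} (h : PySem.Chars.isalnum c = false) :
    pvStepB (ts, 2) c = pvStepB (ts, 0) c := by
  simp [pvStepB, h]

-- a run of digits in mode 1 is appended onto the last token
theorem pvFold_run1 : ∀ (ds : List Char), (∀ c ∈ ds, PySem.Chars.isdigit c = true) →
    ∀ (rest : List Char) (ts : List (List Char)) (t : List Char),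
      List.foldl pvStepB (ts ++ [t], 1) (ds ++ rest) = List.foldl pvStepB (ts ++ [t ++ ds], 1) rest := by
  intro ds
  induction ds with
  | nil => intro _ rest ts t; simp
  | cons d ds ih =>
    intro hall rest ts t
    have hd : PySem.Chars.isdigit d = true := hall d (by simp)
    have hstep : pvStepB (ts ++ [t], 1) d = (ts ++ [t ++ [d]], 1) := by
      simp [pvStepB, pv_digit_not_space hd, hd, List.dropLast_concat, List.getLastD_concat]
    calc List.foldl pvStepB (ts ++ [t], 1) ((d :: ds) ++ rest)
        = List.foldl pvStepB (ts ++ [t ++ [d]], 1) (ds ++ rest) := by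
          rw [List.cons_append, List.foldl_cons, hstep]
      _ = List.foldl pvStepB (ts ++ [(t ++ [d]) ++ ds], 1) rest :=
          ih (fun c hc => hall c (by simp [hc])) rest ts (t ++ [d])
      _ = List.foldl pvStepB (ts ++ [t ++ d :: ds], 1) rest := by simp

-- a run of alphanumerics in mode 2 is appended onto the last token
theorem pvFold_run2 : ∀ (ds : List Char), (∀ c ∈ ds, PySem.Chars.isalnum c = true) →
    ∀ (rest : List Char) (ts : List (List Char)) (t : List Char),
      List.foldl pvStepB (ts ++ [t], 2) (ds ++ rest) = List.foldl pvStepB (ts ++ [t ++ ds], 2) rest := by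
  intro ds
  induction ds with
  | nil => intro _ rest ts t; simp
  | cons d ds ih =>
    intro hall rest ts t
    have hd : PySem.Chars.isalnum d = true := hall d (by simp)
    have hstep : pvStepB (ts ++ [t], 2) d = (ts ++ [t ++ [d]], 2) := by
      simp [pvStepB, pv_alnum_not_space hd, hd, List.dropLast_concat, List.getLastD_concat]
    calc List.foldl pvStepB (ts ++ [t], 2) ((d :: ds) ++ rest)
        = List.foldl pvStepB (ts ++ [t ++ [d]], 2) (ds ++ rest) := by
          rw [List.cons_append, List.foldl_cons, hstep]
      _ = List.foldl pvStepB (ts ++ [(t ++ [d]) ++ ds], 2) rest :=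
          ih (fun c hc => hall c (by simp [hc])) rest ts (t ++ [d])
      _ = List.foldl pvStepB (ts ++ [t ++ d :: ds], 2) rest := by simp

-- the first char of dropWhile fails the predicate
theorem pv_head_dropWhile {p : Char → Bool} : ∀ {l : List Char} {c : Char} {r : List Char},
    l.dropWhile p = c :: r → p c = false := by
  intro l
  induction l with
  | nil => intro c r h; simp at h
  | cons a t ih =>
    intro c r h
    by_cases ha : p a = true
    · rw [List.dropWhile_cons_of_pos ha] at h
      exact ih h
    · rw [List.dropWhile_cons_of_neg ha] at h
      cases h
      simpa using ha

-- MAIN: B's fold from a fresh state produces A's token list, appended to the accumulator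
theorem pvFold_eq_tokA : ∀ (n : Nat) (cs : List Char), cs.length ≤ n →
    ∀ (ts : List (List Char)), (List.foldl pvStepB (ts, 0) cs).1 = ts ++ pvTokA cs := by
  intro n
  induction n with
  | zero =>
    intro cs hcs ts
    have : cs = [] := List.eq_nil_of_length_eq_zero (Nat.le_zero.mp hcs)
    subst this; simp [pvTokA]
  | succ n ih =>
    intro cs hcs ts
    match cs with
    | [] => simp [pvTokA]
    | c :: rest =>
      have hlen : rest.length ≤ n := by simpa using hcs
      by_cases hs : PySem.Chars.isspace c = true
      · -- space: skipped by both
        have hA : pvTokA (c :: rest) = pvTokA rest := by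
          rw [pvTokA, if_pos hs]
        have hstep : pvStepB (ts, 0) c = (ts, 0) := by simp [pvStepB, hs]
        rw [hA, List.foldl_cons, hstep]
        exact ih rest hlen ts
      · have hs' : PySem.Chars.isspace c = false := by simpa using hs
        by_cases hd : PySem.Chars.isdigit c = true
        · -- number: A grabs the digit run; B extends the last token char by char
          have hg1 : pvGrabRun PySem.Chars.isdigit (c :: rest) []
              = (c :: List.takeWhile PySem.Chars.isdigit rest, List.dropWhile PySem.Chars.isdigit rest) := by
            have : pvGrabRun PySem.Chars.isdigit (c :: rest) [] = pvGrabRun PySem.Chars.isdigit rest [c] := by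
              simp [pvGrabRun, hd]
            rw [this, pvGrabRun_eq]
            simp
          have hA : pvTokA (c :: rest)
              = (c :: List.takeWhile PySem.Chars.isdigit rest) :: pvTokA (List.dropWhile PySem.Chars.isdigit rest) := by
            rw [pvTokA]
            simp [hs', hd, hg1]
          have hstep : pvStepB (ts, 0) c = (ts ++ [[c]], 1) := by
            simp [pvStepB, hs', hd]
          have hB1 : (List.foldl pvStepB (ts, 0) (c :: rest)).1
              = (List.foldl pvStepB (ts ++ [[c] ++ List.takeWhile PySem.Chars.isdigit rest], 1)
                  (List.dropWhile PySem.Chars.isdigit rest)).1 := by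
            conv_lhs => rw [List.foldl_cons, hstep,
              show rest = List.takeWhile PySem.Chars.isdigit rest ++ List.dropWhile PySem.Chars.isdigit rest
                from (List.takeWhile_append_dropWhile).symm]
            rw [pvFold_run1 (List.takeWhile PySem.Chars.isdigit rest)
                  (fun x hx => List.mem_takeWhile_imp hx)
                  (List.dropWhile PySem.Chars.isdigit rest) ts [c]]
          have hdrop : (List.foldl pvStepB (ts ++ [[c] ++ List.takeWhile PySem.Chars.isdigit rest], 1)
                  (List.dropWhile PySem.Chars.isdigit rest)).1
              = (List.foldl pvStepB (ts ++ [[c] ++ List.takeWhile PySem.Chars.isdigit rest], 0)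
                  (List.dropWhile PySem.Chars.isdigit rest)).1 := by
            cases hdw : List.dropWhile PySem.Chars.isdigit rest with
            | nil => rfl
            | cons x xs =>
              rw [List.foldl_cons, List.foldl_cons, pvStepB_one_zero (pv_head_dropWhile hdw)]
          have hlen2 : (List.dropWhile PySem.Chars.isdigit rest).length ≤ n :=
            le_trans (List.length_dropWhile_le _ _) hlen
          rw [hB1, hdrop, ih _ hlen2, hA]
          simp
        · have hd' : PySem.Chars.isdigit c = false := by simpa using hd
          by_cases ha : PySem.Chars.isalpha c = true
          · -- variable: A grabs the alnum run; B extends the last token in mode 2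
            have hca : PySem.Chars.isalnum c = true := by simp [PySem.Chars.isalnum, ha]
            have hg1 : pvGrabRun PySem.Chars.isalnum (c :: rest) []
                = (c :: List.takeWhile PySem.Chars.isalnum rest, List.dropWhile PySem.Chars.isalnum rest) := by
              have : pvGrabRun PySem.Chars.isalnum (c :: rest) [] = pvGrabRun PySem.Chars.isalnum rest [c] := by
                simp [pvGrabRun, hca]
              rw [this, pvGrabRun_eq]
              simp
            have hA : pvTokA (c :: rest)
                = (c :: List.takeWhile PySem.Chars.isalnum rest) :: pvTokA (List.dropWhile PySem.Chars.isalnum rest) := by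
              rw [pvTokA]
              simp [hs', hd', ha, hg1]
            have hstep : pvStepB (ts, 0) c = (ts ++ [[c]], 2) := by
              simp [pvStepB, hs', hd', ha]
            have hB1 : (List.foldl pvStepB (ts, 0) (c :: rest)).1
                = (List.foldl pvStepB (ts ++ [[c] ++ List.takeWhile PySem.Chars.isalnum rest], 2)
                    (List.dropWhile PySem.Chars.isalnum rest)).1 := by
              conv_lhs => rw [List.foldl_cons, hstep,
                show rest = List.takeWhile PySem.Chars.isalnum rest ++ List.dropWhile PySem.Chars.isalnum rest
                  from (List.takeWhile_append_dropWhile).symm]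
              rw [pvFold_run2 (List.takeWhile PySem.Chars.isalnum rest)
                    (fun x hx => List.mem_takeWhile_imp hx)
                    (List.dropWhile PySem.Chars.isalnum rest) ts [c]]
            have hdrop : (List.foldl pvStepB (ts ++ [[c] ++ List.takeWhile PySem.Chars.isalnum rest], 2)
                    (List.dropWhile PySem.Chars.isalnum rest)).1
                = (List.foldl pvStepB (ts ++ [[c] ++ List.takeWhile PySem.Chars.isalnum rest], 0)
                    (List.dropWhile PySem.Chars.isalnum rest)).1 := by
              cases hdw : List.dropWhile PySem.Chars.isalnum rest with
              | nil => rfl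
              | cons x xs =>
                rw [List.foldl_cons, List.foldl_cons, pvStepB_two_zero (pv_head_dropWhile hdw)]
            have hlen2 : (List.dropWhile PySem.Chars.isalnum rest).length ≤ n :=
              le_trans (List.length_dropWhile_le _ _) hlen
            rw [hB1, hdrop, ih _ hlen2, hA]
            simp
          · -- operator/parenthesis: one-char token for both
            have ha' : PySem.Chars.isalpha c = false := by simpa using ha
            have hA : pvTokA (c :: rest) = [c] :: pvTokA rest := by
              rw [pvTokA]
              simp [hs', hd', ha']
            have hstep : pvStepB (ts, 0) c = (ts ++ [[c]], 0) := by
              simp [pvStepB, hs', hd', ha']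
            rw [List.foldl_cons, hstep, ih rest hlen, hA]
            simp

-- ===== VERDICT (by name: the statement is the Claim_ definition above) =====
theorem tokenizar_spec : Claim_equal_tokenizar := by
  intro e _
  unfold Spec_tokenizar tokenizar tokenizar_alt
  rw [pvFold_eq_tokA e.toList.length e.toList le_rfl []]
  simp
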